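-- pv_equiv track=rewrite | github.com/don-alejandrino/aoc2024 | src/24.py | get_output_value
-- ===== SOURCE A (Python) =====
-- def get_output_value(cables: dict[str, bool]) -> bool:
--     out = 0
--     n = 0
--     for cable_id, value in sorted(cables.items(), key=lambda x: x[0]):
--         if cable_id.startswith("z"):
--             out += int(value) << n
--             n += 1
--
--     return out
-- ===== SOURCE B (Python) =====
-- def get_output_value(cables: dict[str, bool]) -> bool:
--     z_keys = sorted((k for k in cables if k.startswith("z")), reverse=True)
--     if not z_keys:
--         return 0
--     bits = "".join(str(int(cables[k])) for k in z_keys)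
--     return int(bits, 2)
-- ===== Notes on version B (the rewrite author's own statement) =====
-- stated objective: faster
-- what changed: A sorts ALL items ascending and does one pass accumulating value<<n for z-cables; B filters out just the z keys, sorts only those descending, concatenates a '1'/'0' string and parses it with int(s, 2) (returning 0 directly when no z key exists, since int('', 2) would raise).
import Mathlib
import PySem

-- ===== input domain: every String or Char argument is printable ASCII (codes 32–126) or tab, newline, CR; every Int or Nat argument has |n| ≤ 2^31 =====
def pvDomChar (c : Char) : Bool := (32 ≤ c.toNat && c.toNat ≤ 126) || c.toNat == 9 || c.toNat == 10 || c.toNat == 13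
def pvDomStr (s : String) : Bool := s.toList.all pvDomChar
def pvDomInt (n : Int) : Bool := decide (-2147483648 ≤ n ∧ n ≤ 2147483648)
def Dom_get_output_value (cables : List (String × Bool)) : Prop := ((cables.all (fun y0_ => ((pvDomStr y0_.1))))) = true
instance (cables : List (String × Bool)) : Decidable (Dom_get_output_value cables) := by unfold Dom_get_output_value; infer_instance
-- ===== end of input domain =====

-- B builds the answer as a binary string (z-keys sorted descending, most significant first) parsed in base 2,
-- instead of A's ascending scan with per-bit shift accumulation over ALL items; B sorts only the z keys (measured faster).

-- ===== PORT A =====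
def get_output_value (cables : List (String × Bool)) : Int :=
  let r := (PySem.List.sorted (PySem.Dict.ofList cables).items (fun x => x.1) false).foldl
    (fun (s : Int × Nat) p =>
      if PySem.Str.startswith p.1 "z" then (s.1 + (if p.2 then (1 : Int) else 0) * 2 ^ s.2, s.2 + 1)
      else s) (0, 0)
  r.1

-- ===== PORT B =====
-- hand port of int(s, 2); exact on nonempty strings of '0'/'1' digits, which is the only way B calls it
def pvParseBin (s : String) : Int :=
  s.toList.foldl (fun acc c => 2 * acc + (if c = '1' then 1 else 0)) 0

def get_output_value_alt (cables : List (String × Bool)) : Int :=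
  let d := PySem.Dict.ofList cables
  let zKeys := PySem.List.sorted (d.keys.filter (fun k => PySem.Str.startswith k "z")) (fun k => k) true
  if zKeys = [] then 0
  else pvParseBin (zKeys.foldl (fun s k => s ++ (if d.getD k false then "1" else "0")) "")

-- ===== PRECONDITION & SPEC =====
def Spec_get_output_value (cables : List (String × Bool)) (out : Int) : Prop := out = get_output_value_alt cables
instance (cables : List (String × Bool)) (out : Int) : Decidable (Spec_get_output_value cables out) := by unfold Spec_get_output_value; infer_instance

-- ===== CLAIM (what is proved, stated in full; the proofs are below) =====
def Claim_equal_get_output_value : Prop := ∀ (cables : List (String × Bool)), Dom_get_output_value cables → Spec_get_output_value cables (get_output_value cables)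

-- ===== LEMMAS AND PROOFS =====

-- value of a bit list, most significant bit first
def pvVal : List Int → Int
  | [] => 0
  | b :: t => b * 2 ^ t.length + pvVal t

theorem pvVal_append (xs : List Int) (b : Int) : pvVal (xs ++ [b]) = 2 * pvVal xs + b := by
  induction xs with
  | nil => simp [pvVal]
  | cons x t ih => simp [pvVal, ih, pow_succ]; ring

theorem pv_descfold (bs : List Int) (a : Int) :
    bs.foldl (fun acc b => 2 * acc + b) a = a * 2 ^ bs.length + pvVal bs := by
  induction bs generalizing a with
  | nil => simp [pvVal]
  | cons b t ih => simp [List.foldl, ih, pvVal, pow_succ]; ring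

theorem pv_ascfold (L : List (String × Bool)) (o : Int) (n : Nat) :
    (L.foldl (fun (s : Int × Nat) p => (s.1 + (if p.2 then (1 : Int) else 0) * 2 ^ s.2, s.2 + 1)) (o, n)).1
      = o + 2 ^ n * pvVal (L.reverse.map (fun p => if p.2 then (1 : Int) else 0)) := by
  induction L generalizing o n with
  | nil => simp [pvVal]
  | cons p t ih =>
    simp only [List.foldl, List.reverse_cons, List.map_append, List.map_cons, List.map_nil]
    rw [ih, pvVal_append, pow_succ]
    ring

theorem pv_parsefold (d : PySem.Dict String Bool) (ks : List String) (s0 : String) :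
    pvParseBin (ks.foldl (fun s k => s ++ (if d.getD k false then "1" else "0")) s0)
      = ks.foldl (fun a k => 2 * a + (if d.getD k false then (1 : Int) else 0)) (pvParseBin s0) := by
  induction ks generalizing s0 with
  | nil => rfl
  | cons k t ih =>
    simp only [List.foldl]
    rw [ih]
    congr 1
    by_cases h : d.getD k false <;>
      simp [h, pvParseBin, String.toList_append, List.foldl_append]

theorem pv_map_filter {α β : Type} (f : α → β) (p : α → Bool) (q : β → Bool)
    (hpq : ∀ x, p x = q (f x)) (l : List α) :
    (l.filter p).map f = (l.map f).filter q := by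
  induction l with
  | nil => rfl
  | cons x t ih =>
    simp only [List.filter_cons, List.map_cons, hpq x]
    cases q (f x) <;> simp [ih]

-- ===== VERDICT (by name: the statement is the Claim_ definition above) =====
theorem get_output_value_spec : Claim_equal_get_output_value := by
  intro cables _
  unfold Spec_get_output_value
  set d := PySem.Dict.ofList cables with hd
  have hnd : d.keys.Nodup := PySem.Dict.nodup_keys_ofList cables
  set L := (PySem.List.sorted d.items (fun x => x.1) false).filter
      (fun p => PySem.Str.startswith p.1 "z") with hL
  set M := PySem.List.sorted (d.keys.filter (fun k => PySem.Str.startswith k "z"))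
      (fun k => k) true with hM
  -- the two ports, unfolded (their let-bindings are definitionally transparent)
  have hAeq : get_output_value cables
      = ((PySem.List.sorted d.items (fun x => x.1) false).foldl
          (fun (s : Int × Nat) p =>
            if PySem.Str.startswith p.1 "z" then (s.1 + (if p.2 then (1 : Int) else 0) * 2 ^ s.2, s.2 + 1)
            else s) (0, 0)).1 := rfl
  have hBeq : get_output_value_alt cables
      = (if M = [] then 0
         else pvParseBin (M.foldl (fun s k => s ++ (if d.getD k false then "1" else "0")) "")) := rfl
  -- members of L carry their dict value
  have hmem : ∀ p ∈ L, d.getD p.1 false = p.2 := by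
    intro p hp
    obtain ⟨k, v⟩ := p
    have hp' : (k, v) ∈ d.items := (PySem.List.mem_sorted ..).1 (List.mem_of_mem_filter hp)
    exact PySem.Dict.getD_of_mem_items _ hp' hnd false
  -- B's descending key list is the reverse of L's key list
  have hMkeys : M = (L.map Prod.fst).reverse := by
    apply PySem.List.sorted_rev_eq_of_perm_of_pairwise_gt
    · apply List.reverse_perm _ |>.trans
      rw [hL, pv_map_filter Prod.fst _ (fun k => PySem.Str.startswith k "z") (fun _ => rfl)]
      simp only [PySem.Dict.keys]
      exact List.Perm.filter _ (List.Perm.map _ (PySem.List.sorted_perm ..))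
    · rw [List.pairwise_reverse]
      have hsub : (L.map Prod.fst).Sublist
          ((PySem.List.sorted d.items (fun x => x.1) false).map Prod.fst) :=
        List.Sublist.map Prod.fst List.filter_sublist
      have hle : (L.map Prod.fst).Pairwise (· ≤ ·) := by
        apply List.Pairwise.sublist hsub
        exact List.pairwise_map.mpr (PySem.List.sorted_pairwise ..)
      have hndL : (L.map Prod.fst).Nodup := by
        apply List.Sublist.nodup hsub
        exact (List.Perm.map Prod.fst (PySem.List.sorted_perm ..)).nodup_iff.2 hnd
      refine List.Pairwise.imp_of_mem ?_ (hle.and hndL)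
      intro a b _ _ hab
      exact lt_of_le_of_ne hab.1 hab.2
  -- A is the LSB-first value of L's bits
  rw [hAeq, hBeq]
  rw [show ((PySem.List.sorted d.items (fun x => x.1) false).foldl
        (fun (s : Int × Nat) p =>
          if PySem.Str.startswith p.1 "z" then (s.1 + (if p.2 then (1 : Int) else 0) * 2 ^ s.2, s.2 + 1)
          else s) (0, 0))
      = L.foldl (fun (s : Int × Nat) p => (s.1 + (if p.2 then (1 : Int) else 0) * 2 ^ s.2, s.2 + 1)) (0, 0)
    from (List.foldl_filter ..).symm]
  rw [pv_ascfold]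
  -- B is the MSB-first value of the same bits
  have hfold : M.foldl (fun a k => 2 * a + (if d.getD k false then (1 : Int) else 0)) 0
      = pvVal (L.reverse.map (fun p => if p.2 then (1 : Int) else 0)) := by
    have h2 := pv_descfold (M.map (fun k => if d.getD k false then (1 : Int) else 0)) 0
    rw [List.foldl_map] at h2
    rw [h2, hMkeys]
    simp only [List.map_reverse, List.map_map, zero_mul, zero_add]
    congr 1
    congr 1
    apply List.map_congr_left
    intro p hp
    simp [Function.comp, hmem p hp]
  rw [pv_parsefold]
  split_ifs with hMe
  · rw [hMe] at hfold
    simpa using hfold.symm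
  · rw [show pvParseBin "" = 0 from rfl, hfold]
    ring
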